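-- pv_equiv track=rewrite | github.com/jithendaraa/RoboTutor-Analysis | reader.py | get_skill_groups_info
-- ===== SOURCE A (Python) =====
-- def get_skill_groups_info(tutorID_to_kc_dict, kc_list):
--
--     uniq_skill_groups = []
--     skill_group_to_activity_map = {}
--
--     for key in tutorID_to_kc_dict:
--         skills = tutorID_to_kc_dict[key]
--         skill_idxs = []
--         for skill in skills:
--             idx = kc_list.index(skill)
--             skill_idxs.append(idx)
--         if skill_idxs not in uniq_skill_groups:
--             uniq_skill_groups.append(skill_idxs)
--
--     for group in uniq_skill_groups:
--         skill_group_to_activity_map[str(uniq_skill_groups.index(group))] = []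
--
--     for key in tutorID_to_kc_dict:
--         skills = tutorID_to_kc_dict[key]
--         skill_group = []
--         for skill in skills:
--             idx = kc_list.index(skill)
--             skill_group.append(idx)
--         skill_group_to_activity_map[str(uniq_skill_groups.index(skill_group))].append(key)
--
--     # list, dict. The latter maps skill group '0' to activities that fall under this skill group
--     return uniq_skill_groups, skill_group_to_activity_map
-- ===== SOURCE B (Python) =====
-- def get_skill_groups_info(tutorID_to_kc_dict, kc_list):
--     # one pass: precomputed skill->index dict; 'seen' maps a signature tuple to its group position
--     skill_to_idx = {}
--     for i, s in enumerate(kc_list):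
--         if s not in skill_to_idx:
--             skill_to_idx[s] = i
--     uniq_skill_groups = []
--     skill_group_to_activity_map = {}
--     seen = {}
--     for key, skills in tutorID_to_kc_dict.items():
--         skill_idxs = [skill_to_idx[s] for s in skills]
--         j = seen.get(tuple(skill_idxs))
--         if j is None:
--             j = len(uniq_skill_groups)
--             seen[tuple(skill_idxs)] = j
--             uniq_skill_groups.append(skill_idxs)
--             skill_group_to_activity_map[str(j)] = [key]
--         else:
--             skill_group_to_activity_map[str(j)].append(key)
--     return uniq_skill_groups, skill_group_to_activity_map
-- ===== Notes on version B (the rewrite author's own statement) =====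
-- stated objective: alternative
-- what changed: Replaces A's three passes with repeated inner list scans (kc_list.index per skill, 'not in' over the group list, uniq_skill_groups.index twice) by a single pass over the activities using a precomputed skill->index dict and a 'seen' dict from signature tuples to group positions, so every inner linear scan disappears.
import Mathlib
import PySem

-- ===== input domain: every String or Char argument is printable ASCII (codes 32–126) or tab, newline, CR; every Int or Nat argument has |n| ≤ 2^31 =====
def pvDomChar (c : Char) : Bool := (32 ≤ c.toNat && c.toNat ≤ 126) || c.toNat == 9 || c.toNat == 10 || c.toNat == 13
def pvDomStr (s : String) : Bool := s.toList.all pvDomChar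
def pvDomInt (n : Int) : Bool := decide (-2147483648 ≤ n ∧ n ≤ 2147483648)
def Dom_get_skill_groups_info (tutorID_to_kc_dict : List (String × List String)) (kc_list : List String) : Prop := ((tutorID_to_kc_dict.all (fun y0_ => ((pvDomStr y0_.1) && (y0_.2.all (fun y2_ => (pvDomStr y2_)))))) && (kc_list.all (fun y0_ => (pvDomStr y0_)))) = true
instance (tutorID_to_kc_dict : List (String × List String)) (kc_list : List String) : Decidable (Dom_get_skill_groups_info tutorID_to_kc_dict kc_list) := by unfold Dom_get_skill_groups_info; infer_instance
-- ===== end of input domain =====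

-- B fuses A's three passes (with their inner kc_list.index / 'not in' / uniq.index list scans) into one pass
-- driven by a precomputed skill->index dict and a signature->position dict (a different decomposition).


-- ===== PORT A =====
-- inner loop 'for skill in skills: skill_idxs.append(kc_list.index(skill))'.
-- kc_list.index raises ValueError when the skill is missing; Pre_ excludes that, so the .getD 0 default is never used.
def pvIdxsA (kc_list : List String) (skills : List String) : List Int :=
  skills.foldl (fun acc s => acc ++ [((PySem.List.index? kc_list s).map (fun k => (k : Int))).getD 0]) []

-- 'for key in tutorID_to_kc_dict: skills = tutorID_to_kc_dict[key]': iterating a dict yields each key once and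
-- looks its value up; with the unique keys Pre_ demands, that value is the pair's second component.
def get_skill_groups_info (tutorID_to_kc_dict : List (String × List String)) (kc_list : List String) : List (List Int) × (List (String × List String)) :=
  let uniq : List (List Int) := tutorID_to_kc_dict.foldl (fun u p =>
      let g := pvIdxsA kc_list p.2
      if u.contains g then u else u ++ [g]) []
  let m0 : PySem.Dict String (List String) := uniq.foldl (fun m g =>
      m.insert (PySem.Int.toStr (((PySem.List.index? uniq g).map (fun k => (k : Int))).getD 0)) []) PySem.Dict.empty
  -- 'map[str(uniq.index(g))].append(key)': the key is always present (g was put into uniq by the first loop)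
  let m : PySem.Dict String (List String) := tutorID_to_kc_dict.foldl (fun m p =>
      let g := pvIdxsA kc_list p.2
      m.modify (PySem.Int.toStr (((PySem.List.index? uniq g).map (fun k => (k : Int))).getD 0)) [] (fun l => l ++ [p.1])) m0
  (uniq, m.items)

-- ===== PORT B =====
-- 'skill_to_idx = {}; for i, s in enumerate(kc_list): if s not in skill_to_idx: skill_to_idx[s] = i'
def pvSkillToIdx (kc_list : List String) : PySem.Dict String Int :=
  (PySem.List.enumerate kc_list).foldl (fun m q => if m.contains q.2 then m else m.insert q.2 q.1) PySem.Dict.empty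

-- single pass; state = (uniq_skill_groups, seen, skill_group_to_activity_map).
-- skill_to_idx[s] raises KeyError when the skill is missing; Pre_ excludes that, so the .getD 0 default is never used.
def get_skill_groups_info_alt (tutorID_to_kc_dict : List (String × List String)) (kc_list : List String) : List (List Int) × (List (String × List String)) :=
  let s2i := pvSkillToIdx kc_list
  let st := tutorID_to_kc_dict.foldl
    (fun st p =>
      let g : List Int := p.2.map (fun s => s2i.getD s 0)
      match st.2.1.get? g with
      | some j => (st.1, st.2.1, st.2.2.modify (PySem.Int.toStr j) [] (fun l => l ++ [p.1]))
      | none   => (st.1 ++ [g], st.2.1.insert g ((st.1.length : Int)),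
                   st.2.2.insert (PySem.Int.toStr ((st.1.length : Int))) [p.1]))
    (([] : List (List Int)), (PySem.Dict.empty : PySem.Dict (List Int) Int),
     (PySem.Dict.empty : PySem.Dict String (List String)))
  (st.1, st.2.2.items)

-- ===== PRECONDITION & SPEC =====
-- Pre_ excludes (a) activities naming a skill absent from kc_list, on which Python A raises ValueError
-- (and B KeyError), and (b) duplicate activity ids, which a Python dict cannot represent (the association
-- list would be ambiguous: Python dedups them before A ever runs).
def Pre_get_skill_groups_info (tutorID_to_kc_dict : List (String × List String)) (kc_list : List String) : Prop :=
  (tutorID_to_kc_dict.map (·.1)).Nodup ∧ ∀ p ∈ tutorID_to_kc_dict, ∀ s ∈ p.2, s ∈ kc_list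
instance (tutorID_to_kc_dict : List (String × List String)) (kc_list : List String) : Decidable (Pre_get_skill_groups_info tutorID_to_kc_dict kc_list) := by unfold Pre_get_skill_groups_info; infer_instance

def pvWitness_get_skill_groups_info : (List (String × List String)) × List String :=
  ([("t1", ["a"]), ("t2", ["b", "a"]), ("t3", ["a"])], ["a", "b"])

def Spec_get_skill_groups_info (tutorID_to_kc_dict : List (String × List String)) (kc_list : List String) (out : List (List Int) × (List (String × List String))) : Prop := out = get_skill_groups_info_alt tutorID_to_kc_dict kc_list
instance (tutorID_to_kc_dict : List (String × List String)) (kc_list : List String) (out : List (List Int) × (List (String × List String))) : Decidable (Spec_get_skill_groups_info tutorID_to_kc_dict kc_list out) := by unfold Spec_get_skill_groups_info; infer_instance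

-- ===== CLAIM (what is proved, stated in full; the proofs are below) =====
def Claim_equal_get_skill_groups_info : Prop := ∀ (tutorID_to_kc_dict : List (String × List String)) (kc_list : List String), Dom_get_skill_groups_info tutorID_to_kc_dict kc_list → Pre_get_skill_groups_info tutorID_to_kc_dict kc_list → Spec_get_skill_groups_info tutorID_to_kc_dict kc_list (get_skill_groups_info tutorID_to_kc_dict kc_list)

-- ===== LEMMAS AND PROOFS =====

-- the common per-activity signature: indices (first occurrence in kc_list) of the activity's skills
def pvG (kc_list : List String) (p : String × List String) : List Int :=
  p.2.map (fun s => ((PySem.List.index? kc_list s).map (fun k => (k : Int))).getD 0)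

-- the canonical result both ports reach: u in first-occurrence order, row i = activities with signature u[i]
def pvRows (kc_list : List String) (t : List (String × List String)) (u : List (List Int)) : List (String × List String) :=
  (PySem.List.enumerate u).map (fun q => (PySem.Int.toStr q.1, (t.filter (fun p => pvG kc_list p == q.2)).map (·.1)))


theorem pvIdxsA_eq_pvG (kc : List String) (p : String × List String) : pvIdxsA kc p.2 = pvG kc p := by
  simpa [pvIdxsA, pvG] using PySem.List.foldl_append_singleton_eq_map
    (fun s => ((PySem.List.index? kc s).map (fun k => (k : Int))).getD 0) p.2 []

theorem pvS2iAux (kc : List String) : ∀ (i0 : Int) (m : PySem.Dict String Int) (s : String),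
    ((PySem.List.enumerate kc i0).foldl (fun m q => if m.contains q.2 then m else m.insert q.2 q.1) m).get? s
      = if m.contains s then m.get? s else (PySem.List.index? kc s).map (fun k => i0 + (k : Int)) := by
  induction kc with
  | nil =>
    intro i0 m s
    simp only [PySem.List.enumerate_nil, List.foldl_nil, PySem.List.index?, List.idxOf?_nil]
    by_cases h : m.contains s
    · simp [h]
    · simp only [Bool.not_eq_true] at h
      simp [h, (PySem.Dict.get?_eq_none_iff_contains m s).mpr h]
  | cons x xs ih =>
    intro i0 m s
    rw [PySem.List.enumerate_cons, List.foldl_cons]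
    by_cases hx : m.contains x
    · simp only [hx, if_true, ih]
      by_cases hs : m.contains s
      · simp [hs]
      · have hxs : x ≠ s := by rintro rfl; rw [hx] at hs; exact hs rfl
        simp only [Bool.not_eq_true] at hs
        rw [PySem.List.index?_cons_of_ne xs hxs]
        simp only [hs, Bool.false_eq_true, if_false]
        cases h : PySem.List.index? xs s with
        | none => simp
        | some k => simp; omega
    · simp only [hx, Bool.false_eq_true, if_false, ih]
      by_cases hxs : s = x
      · subst hxs
        rw [PySem.Dict.contains_insert]
        simp [PySem.Dict.get?_insert_self, hx]
        rw [List.idxOf?_cons]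
        simp
      · rw [PySem.Dict.contains_insert]
        have hbe : (s == x) = false := by simp [hxs]
        rw [hbe]
        simp only [Bool.false_or]
        rw [PySem.Dict.get?_insert]
        rw [if_neg hxs]
        by_cases hs : m.contains s
        · simp [hs]
        · simp only [Bool.not_eq_true] at hs
          rw [PySem.List.index?_cons_of_ne xs (Ne.symm hxs)]
          simp only [hs, Bool.false_eq_true, if_false]
          cases h : PySem.List.index? xs s with
          | none => simp
          | some k => simp; omega

theorem pvS2i_getD (kc : List String) (s : String) :
    (pvSkillToIdx kc).getD s 0 = ((PySem.List.index? kc s).map (fun k => (k : Int))).getD 0 := by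
  rw [PySem.Dict.getD_eq_get?_getD]
  unfold pvSkillToIdx
  rw [pvS2iAux kc 0 PySem.Dict.empty s]
  simp [PySem.Dict.contains_empty]

-- decimal decoding, used only to show str is injective on the nonnegative ints
def pvDec (a : Nat) (l : List Char) : Nat := l.foldl (fun a c => a * 10 + (c.toNat - 48)) a

theorem pvCore_acc : ∀ (n : Nat) (f : Nat) (ds : List Char), n < f →
    Nat.toDigitsCore 10 f n ds = Nat.toDigitsCore 10 f n [] ++ ds := by
  intro n
  induction n using Nat.strong_induction_on with
  | _ n ih =>
    intro f ds hf
    match f, hf with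
    | f + 1, hf =>
      simp only [Nat.toDigitsCore]
      by_cases h : n / 10 = 0
      · simp [h]
      · simp only [h, if_false]
        have hn : 0 < n := by
          rcases Nat.eq_zero_or_pos n with h0 | h0
          · exact absurd (by simp [h0]) h
          · exact h0
        have hlt : n / 10 < n := Nat.div_lt_self hn (by norm_num)
        rw [ih (n / 10) hlt f ((n % 10).digitChar :: ds) (by omega),
            ih (n / 10) hlt f [(n % 10).digitChar] (by omega)]
        simp

theorem pvDigitChar_val (m : Nat) (hm : m < 10) : (Nat.digitChar m).toNat - 48 = m := by
  interval_cases m <;> decide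

theorem pvDec_toDigitsCore : ∀ (n : Nat) (f : Nat), n < f →
    pvDec 0 (Nat.toDigitsCore 10 f n []) = n := by
  intro n
  induction n using Nat.strong_induction_on with
  | _ n ih =>
    intro f hf
    match f, hf with
    | f + 1, hf =>
      simp only [Nat.toDigitsCore]
      by_cases h : n / 10 = 0
      · simp only [h, if_true]
        simp [pvDec, pvDigitChar_val (n % 10) (Nat.mod_lt n (by norm_num))]
        omega
      · simp only [h, if_false]
        have hn : 0 < n := by
          rcases Nat.eq_zero_or_pos n with h0 | h0
          · exact absurd (by simp [h0]) h
          · exact h0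
        have hlt : n / 10 < n := Nat.div_lt_self hn (by norm_num)
        rw [pvCore_acc (n / 10) f _ (by omega)]
        have := ih (n / 10) hlt f (by omega)
        simp [pvDec, List.foldl_append] at this ⊢
        rw [this, pvDigitChar_val (n % 10) (Nat.mod_lt n (by norm_num))]
        omega

theorem pvToStr_inj (a b : Int) (ha : 0 ≤ a) (hb : 0 ≤ b) (h : PySem.Int.toStr a = PySem.Int.toStr b) : a = b := by
  have h2 := congrArg String.toList h
  rw [PySem.Int.toList_toStr, PySem.Int.toList_toStr] at h2
  unfold PySem.Int.toChars at h2
  rw [if_neg (by omega), if_neg (by omega)] at h2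
  have h3 : a.toNat = b.toNat := by
    have := congrArg (pvDec 0) h2
    unfold Nat.toDigits at this
    rwa [pvDec_toDigitsCore _ _ (by omega), pvDec_toDigitsCore _ _ (by omega)] at this
  omega

-- canonical first-occurrence list of signatures
def pvU (kc : List String) (t : List (String × List String)) : List (List Int) :=
  PySem.List.dedup (t.map (pvG kc))

-- the key list str(0), …, str(n-1)
def pvKl (u : List (List Int)) : List String :=
  (PySem.List.enumerate u).map (fun q => PySem.Int.toStr q.1)

theorem pvIndex?_getElem (u : List (List Int)) (h : u.Nodup) (k : Nat) (hk : k < u.length) :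
    PySem.List.index? u u[k] = some k := by
  rw [PySem.List.index?_eq_idxOf?, List.idxOf?_eq_some_iff]
  exact ⟨hk, rfl, fun j hj hje => by have := (List.Nodup.getElem_inj_iff h).mp hje; omega⟩

theorem pvKl_nodup (u : List (List Int)) : (pvKl u).Nodup := by
  unfold pvKl
  have : (PySem.List.enumerate u).map (fun q => PySem.Int.toStr q.1)
      = ((PySem.List.enumerate u).map (fun q => q.1)).map PySem.Int.toStr := by
    rw [List.map_map]; rfl
  rw [this, PySem.List.map_fst_enumerate]
  refine List.Nodup.map_on ?_ (PySem.List.nodup_pyRange_one 0 (0 + u.length))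
  intro x hx y hy hxy
  exact pvToStr_inj x y (PySem.List.mem_pyRange_one.mp hx).1 (PySem.List.mem_pyRange_one.mp hy).1 hxy

theorem pvMem_enumerate (u : List (List Int)) (k : Nat) (hk : k < u.length) :
    ((k : Int), u[k]) ∈ PySem.List.enumerate u := by
  rw [PySem.List.mem_enumerate_iff]
  exact ⟨k, hk, by simp⟩

theorem pvMemKl (u : List (List Int)) (j : Nat) (hj : j < u.length) :
    PySem.Int.toStr (j : Int) ∈ pvKl u := by
  unfold pvKl
  exact List.mem_map_of_mem (pvMem_enumerate u j hj)

theorem pvNotMemKl (u : List (List Int)) : PySem.Int.toStr ((u.length : Int)) ∉ pvKl u := by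
  unfold pvKl
  intro hmem
  obtain ⟨q, hq, he⟩ := List.mem_map.mp hmem
  obtain ⟨k, hk, rfl⟩ := (PySem.List.mem_enumerate_iff u 0 q).mp hq
  have := pvToStr_inj _ _ (by omega) (by omega) he
  simp at this
  omega

-- enumerate-row characterisation of a dict: getD reads the row
theorem pvGetD_row (u : List (List Int)) (m : PySem.Dict String (List String))
    (v : Int × List Int → List String)
    (hm : m.items = (PySem.List.enumerate u).map (fun q => (PySem.Int.toStr q.1, v q)))
    (i : Int) (g : List Int) (hq : (i, g) ∈ PySem.List.enumerate u) :
    m.getD (PySem.Int.toStr i) [] = v (i, g) := by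
  have hnd : m.keys.Nodup := by
    have : m.keys = pvKl u := by
      simp only [PySem.Dict.keys, hm, List.map_map, pvKl]; rfl
    rw [this]; exact pvKl_nodup u
  exact PySem.Dict.getD_of_mem_items _ (by rw [hm]; exact List.mem_map_of_mem hq) hnd []

-- appending one activity to the row of an existing group j
theorem pvModifyRow (u : List (List Int)) (m : PySem.Dict String (List String))
    (v : Int × List Int → List String)
    (hm : m.items = (PySem.List.enumerate u).map (fun q => (PySem.Int.toStr q.1, v q)))
    (j : Nat) (hj : j < u.length) (x : String) :
    (m.modify (PySem.Int.toStr (j : Int)) [] (fun l => l ++ [x])).items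
      = (PySem.List.enumerate u).map
          (fun q => (PySem.Int.toStr q.1, if q.1 = (j : Int) then v q ++ [x] else v q)) := by
  have hkeys : m.keys = pvKl u := by
    simp only [PySem.Dict.keys, hm, List.map_map, pvKl]; rfl
  have hnd : m.keys.Nodup := by rw [hkeys]; exact pvKl_nodup u
  have hcont : m.contains (PySem.Int.toStr (j : Int)) = true :=
    (PySem.Dict.contains_iff_mem_keys m _).mpr (by rw [hkeys]; exact pvMemKl u j hj)
  set m' := m.modify (PySem.Int.toStr (j : Int)) [] (fun l => l ++ [x]) with hm'
  have hkeys' : m'.keys = m.keys := by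
    rw [hm', PySem.Dict.keys_modify, PySem.Dict.keys_insert_of_contains _ _ hcont]
  have hnd' : m'.keys.Nodup := by rw [hkeys']; exact hnd
  rw [PySem.Dict.items_eq_map_keys m' hnd' [], hkeys', hkeys]
  unfold pvKl
  rw [List.map_map]
  apply List.map_congr_left
  intro q hq
  obtain ⟨k, hk, rfl⟩ := (PySem.List.mem_enumerate_iff u 0 q).mp hq
  simp only [zero_add] at hq ⊢
  simp only [Function.comp]
  rw [hm', PySem.Dict.getD_modify]
  by_cases hkj : k = j
  · subst hkj
    rw [if_pos rfl, if_pos rfl]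
    rw [pvGetD_row u m v hm (k : Int) u[k] hq]
  · have hne : PySem.Int.toStr ((k : Int)) ≠ PySem.Int.toStr (j : Int) := by
      intro he
      have := pvToStr_inj _ _ (by omega) (by omega) he
      omega
    rw [if_neg hne, if_neg (by omega)]
    rw [pvGetD_row u m v hm (k : Int) u[k] hq]

-- pass 1 of A computes the canonical first-occurrence list
theorem pvPass1 (kc : List String) (t : List (String × List String)) :
    t.foldl (fun u p =>
        let g := pvIdxsA kc p.2
        if u.contains g then u else u ++ [g]) [] = pvU kc t := by
  unfold pvU
  rw [PySem.List.dedup_eq_ofList, PySem.Set.ofList_eq_foldl, List.foldl_map]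
  apply PySem.List.foldl_congr_mem
  intro acc p _
  rw [pvIdxsA_eq_pvG]
  by_cases hmem : pvG kc p ∈ acc
  · rw [PySem.Set.add_of_mem hmem, if_pos (by simpa using hmem)]
  · rw [PySem.Set.add_of_not_mem hmem, if_neg (by simpa using hmem)]

-- the key str(uniq.index(g)) both of A's last passes compute
def pvStepKey (u : List (List Int)) (g : List Int) : String :=
  PySem.Int.toStr (((PySem.List.index? u g).map (fun k => (k : Int))).getD 0)

theorem pvStepKey_getElem (u : List (List Int)) (hnd : u.Nodup) (k : Nat) (hk : k < u.length) :
    pvStepKey u u[k] = PySem.Int.toStr (k : Int) := by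
  unfold pvStepKey
  rw [pvIndex?_getElem u hnd k hk]
  simp

-- pass 2 of A: the empty rows, keyed str(0), …, str(n-1), in order
theorem pvPass2 (u : List (List Int)) (hnd : u.Nodup) :
    (u.foldl (fun m g => m.insert (pvStepKey u g) ([] : List String)) PySem.Dict.empty).items
      = (PySem.List.enumerate u).map (fun q => (PySem.Int.toStr q.1, ([] : List String))) := by
  have key : ∀ (F : PySem.Dict String (List String) → List Int → PySem.Dict String (List String))
      (d : PySem.Dict String (List String)),
      u.foldl F d = (PySem.List.enumerate u).foldl (fun m q => F m q.2) d := by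
    intro F d
    conv_lhs => rw [← PySem.List.map_snd_enumerate u 0]
    rw [List.foldl_map]
  rw [key]
  have h1 : (PySem.List.enumerate u).foldl (fun m q => m.insert (pvStepKey u q.2) ([] : List String)) PySem.Dict.empty
      = (PySem.List.enumerate u).foldl (fun m q => m.insert (PySem.Int.toStr q.1) ([] : List String)) PySem.Dict.empty := by
    apply PySem.List.foldl_congr_mem
    intro acc q hq
    obtain ⟨k, hk, rfl⟩ := (PySem.List.mem_enumerate_iff u 0 q).mp hq
    simp only [zero_add]
    rw [pvStepKey_getElem u hnd k hk]
  rw [h1]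
  rw [PySem.Dict.items_foldl_insert_fresh _ _ _ _ (fun a _ => PySem.Dict.contains_empty _)
      (by simpa [pvKl] using pvKl_nodup u)]
  simp [PySem.Dict.empty]

-- pass 3 of A: fill the rows in activity order
theorem pvPass3 (kc : List String) (u : List (List Int)) (hnd : u.Nodup) :
    ∀ (l : List (String × List String)), (∀ p ∈ l, pvG kc p ∈ u) →
    (l.foldl (fun m p => m.modify (pvStepKey u (pvG kc p)) [] (fun l => l ++ [p.1]))
      (u.foldl (fun m g => m.insert (pvStepKey u g) ([] : List String)) PySem.Dict.empty)).items
      = pvRows kc l u := by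
  intro l
  induction l using List.reverseRecOn with
  | nil =>
    intro _
    rw [List.foldl_nil, pvPass2 u hnd]
    unfold pvRows
    simp
  | append_singleton l x ih =>
    intro hmem
    have hl : ∀ p ∈ l, pvG kc p ∈ u := fun p hp => hmem p (List.mem_append_left _ hp)
    have hx : pvG kc x ∈ u := hmem x (List.mem_append_right _ (List.mem_singleton.mpr rfl))
    rw [List.foldl_append, List.foldl_cons, List.foldl_nil]
    obtain ⟨k, hidx⟩ : ∃ k, PySem.List.index? u (pvG kc x) = some k := by
      cases h : PySem.List.index? u (pvG kc x) with
      | none => exact absurd ((PySem.List.index?_eq_none_iff u _).mp h) (by simpa using hx)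
      | some k => exact ⟨k, rfl⟩
    obtain ⟨hk, hgk, -⟩ := PySem.List.getElem_of_index?_eq_some hidx
    rw [show pvStepKey u (pvG kc x) = PySem.Int.toStr (k : Int) from by
      unfold pvStepKey; rw [hidx]; simp]
    rw [pvModifyRow u _ (fun q => (l.filter (fun p => pvG kc p == q.2)).map (·.1))
        (by rw [ih hl]; rfl) k hk x.1]
    unfold pvRows
    apply List.map_congr_left
    intro q hq
    obtain ⟨j, hj, rfl⟩ := (PySem.List.mem_enumerate_iff u 0 q).mp hq
    simp only [zero_add, List.filter_append, List.map_append]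
    by_cases hjk : j = k
    · subst hjk
      rw [if_pos rfl]
      simp [hgk]
    · rw [if_neg (by omega)]
      have : (pvG kc x == u[j]) = false := by
        simp only [beq_eq_false_iff_ne, ne_eq]
        intro he
        rw [← hgk] at he
        exact hjk ((List.Nodup.getElem_inj_iff hnd).mp he).symm
      simp [this]

-- A's port reaches the canonical pair
theorem pvAeq (t : List (String × List String)) (kc : List String) :
    get_skill_groups_info t kc = (pvU kc t, pvRows kc t (pvU kc t)) := by
  have hnd : (pvU kc t).Nodup := by
    unfold pvU; rw [PySem.List.dedup_eq_ofList]; exact PySem.Set.nodup_ofList _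
  have hmem : ∀ p ∈ t, pvG kc p ∈ pvU kc t := by
    intro p hp
    unfold pvU
    rw [PySem.List.dedup_eq_ofList, PySem.Set.mem_ofList]
    exact List.mem_map_of_mem hp
  unfold get_skill_groups_info
  simp only [pvPass1]
  refine Prod.ext rfl ?_
  simp only
  have h2 : ∀ (m : PySem.Dict String (List String)),
      t.foldl (fun m p =>
          let g := pvIdxsA kc p.2
          m.modify (PySem.Int.toStr (((PySem.List.index? (pvU kc t) g).map (fun k => (k : Int))).getD 0)) []
            (fun l => l ++ [p.1])) m
        = t.foldl (fun m p => m.modify (pvStepKey (pvU kc t) (pvG kc p)) [] (fun l => l ++ [p.1])) m := by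
    intro m
    apply PySem.List.foldl_congr_mem
    intro acc p _
    simp only [pvIdxsA_eq_pvG, pvStepKey]
  have h3 : (pvU kc t).foldl (fun m g =>
        m.insert (PySem.Int.toStr (((PySem.List.index? (pvU kc t) g).map (fun k => (k : Int))).getD 0)) ([] : List String))
      PySem.Dict.empty
      = (pvU kc t).foldl (fun m g => m.insert (pvStepKey (pvU kc t) g) ([] : List String)) PySem.Dict.empty := by
    apply PySem.List.foldl_congr_mem
    intro acc g _
    simp only [pvStepKey]
  rw [h3, h2]
  exact pvPass3 kc (pvU kc t) hnd t hmem

-- B's single pass, as one definition of the running state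
def pvFoldB (kc : List String) (l : List (String × List String)) :
    List (List Int) × PySem.Dict (List Int) Int × PySem.Dict String (List String) :=
  l.foldl (fun st p =>
      let g : List Int := p.2.map (fun s => (pvSkillToIdx kc).getD s 0)
      match st.2.1.get? g with
      | some j => (st.1, st.2.1, st.2.2.modify (PySem.Int.toStr j) [] (fun l => l ++ [p.1]))
      | none   => (st.1 ++ [g], st.2.1.insert g ((st.1.length : Int)),
                   st.2.2.insert (PySem.Int.toStr ((st.1.length : Int))) [p.1]))
    (([] : List (List Int)), (PySem.Dict.empty : PySem.Dict (List Int) Int),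
     (PySem.Dict.empty : PySem.Dict String (List String)))

theorem pvFoldB_snoc (kc : List String) (l : List (String × List String)) (x : String × List String) :
    pvFoldB kc (l ++ [x]) =
      (let st := pvFoldB kc l
       let g : List Int := x.2.map (fun s => (pvSkillToIdx kc).getD s 0)
       match st.2.1.get? g with
       | some j => (st.1, st.2.1, st.2.2.modify (PySem.Int.toStr j) [] (fun l => l ++ [x.1]))
       | none   => (st.1 ++ [g], st.2.1.insert g ((st.1.length : Int)),
                    st.2.2.insert (PySem.Int.toStr ((st.1.length : Int))) [x.1])) := by
  unfold pvFoldB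
  rw [List.foldl_append, List.foldl_cons, List.foldl_nil]

theorem pvGB (kc : List String) (x : String × List String) :
    x.2.map (fun s => (pvSkillToIdx kc).getD s 0) = pvG kc x := by
  unfold pvG
  exact List.map_congr_left (fun s _ => pvS2i_getD kc s)

theorem pvMemU (kc : List String) (l : List (String × List String)) :
    ∀ p ∈ l, pvG kc p ∈ pvU kc l := by
  intro p hp
  unfold pvU
  rw [PySem.List.dedup_eq_ofList, PySem.Set.mem_ofList]
  exact List.mem_map_of_mem hp

theorem pvU_snoc (kc : List String) (l : List (String × List String)) (x : String × List String) :
    pvU kc (l ++ [x]) = PySem.Set.add (pvU kc l) (pvG kc x) := by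
  unfold pvU
  rw [PySem.List.dedup_eq_ofList, PySem.List.dedup_eq_ofList, List.map_append,
    List.map_singleton]
  exact PySem.Set.ofList_append_singleton _ _

theorem pvU_nodup (kc : List String) (l : List (String × List String)) : (pvU kc l).Nodup := by
  unfold pvU
  rw [PySem.List.dedup_eq_ofList]
  exact PySem.Set.nodup_ofList _

-- the invariant of B's single pass
theorem pvBinv (kc : List String) :
    ∀ (l : List (String × List String)),
      (pvFoldB kc l).1 = pvU kc l
      ∧ (∀ g, (pvFoldB kc l).2.1.get? g = (PySem.List.index? (pvU kc l) g).map (fun k => (k : Int)))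
      ∧ (pvFoldB kc l).2.2.items = pvRows kc l (pvU kc l) := by
  intro l
  induction l using List.reverseRecOn with
  | nil =>
    refine ⟨rfl, ?_, ?_⟩
    · intro g
      simp [pvFoldB, pvU, PySem.List.dedup_eq_ofList, PySem.Dict.get?_empty, PySem.List.index?]
    · simp [pvFoldB, pvU, pvRows, PySem.List.dedup_eq_ofList, PySem.Set.ofList_nil,
        PySem.List.enumerate_nil, PySem.Dict.empty]
  | append_singleton l x ih =>
    obtain ⟨h1, h2, h3⟩ := ih
    have hU := pvU_snoc kc l x
    rw [pvFoldB_snoc kc l x]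
    simp only [pvGB kc x]
    by_cases hmem : pvG kc x ∈ pvU kc l
    · -- an already-seen signature: only the row of its group grows
      have hU2 : pvU kc (l ++ [x]) = pvU kc l := by rw [hU, PySem.Set.add_of_mem hmem]
      obtain ⟨k, hidx⟩ : ∃ k, PySem.List.index? (pvU kc l) (pvG kc x) = some k := by
        cases h : PySem.List.index? (pvU kc l) (pvG kc x) with
        | none => exact absurd ((PySem.List.index?_eq_none_iff _ _).mp h) (by simpa using hmem)
        | some k => exact ⟨k, rfl⟩
      obtain ⟨hk, hgk, -⟩ := PySem.List.getElem_of_index?_eq_some hidx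
      rw [h2 (pvG kc x), hidx]
      simp only [Option.pure_def, Option.bind_eq_bind, Option.bind_some, Option.map_some]
      refine ⟨by rw [hU2]; exact h1, ?_, ?_⟩
      · intro g'; rw [hU2]; exact h2 g'
      · rw [pvModifyRow (pvU kc l) _ (fun q => (l.filter (fun p => pvG kc p == q.2)).map (·.1))
            (by rw [h3]; rfl) k hk x.1]
        rw [hU2]
        unfold pvRows
        apply List.map_congr_left
        intro q hq
        obtain ⟨j, hj, rfl⟩ := (PySem.List.mem_enumerate_iff (pvU kc l) 0 q).mp hq
        simp only [zero_add, List.filter_append, List.map_append]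
        by_cases hjk : j = k
        · subst hjk
          rw [if_pos rfl]
          simp [hgk]
        · rw [if_neg (by omega)]
          have : (pvG kc x == (pvU kc l)[j]) = false := by
            simp only [beq_eq_false_iff_ne, ne_eq]
            intro he
            rw [← hgk] at he
            exact hjk ((List.Nodup.getElem_inj_iff (pvU_nodup kc l)).mp he).symm
          simp [this]
    · -- a new signature: a new group and a fresh singleton row appear at the end
      have hU2 : pvU kc (l ++ [x]) = pvU kc l ++ [pvG kc x] := by
        rw [hU, PySem.Set.add_of_not_mem hmem]
      have hnone : (pvFoldB kc l).2.1.get? (pvG kc x) = none := by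
        rw [h2 (pvG kc x), (PySem.List.index?_eq_none_iff _ _).mpr hmem]
        rfl
      rw [hnone]
      simp only [h1]
      refine ⟨by rw [hU2], ?_, ?_⟩
      · intro g'
        rw [hU2]
        by_cases hg' : g' = pvG kc x
        · subst hg'
          rw [PySem.Dict.get?_insert_self,
            PySem.List.index?_append_singleton_self _ _ hmem]
          rfl
        · rw [PySem.Dict.get?_insert, if_neg hg', h2 g']
          by_cases hin : g' ∈ pvU kc l
          · rw [PySem.List.index?_append_of_mem _ hin]
          · rw [(PySem.List.index?_eq_none_iff _ _).mpr hin,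
              (PySem.List.index?_eq_none_iff _ _).mpr (by simp [hin, hg'])]
      · have hkeys : (pvFoldB kc l).2.2.keys = pvKl (pvU kc l) := by
          simp only [PySem.Dict.keys, h3, pvRows, List.map_map, pvKl]; rfl
        have hcont : (pvFoldB kc l).2.2.contains (PySem.Int.toStr (((pvU kc l).length : Int))) = false := by
          rw [← Bool.not_eq_true]
          intro hc
          exact pvNotMemKl (pvU kc l) (hkeys ▸ (PySem.Dict.contains_iff_mem_keys _ _).mp hc)
        rw [PySem.Dict.items_insert_of_not_contains _ _ hcont, h3, hU2]
        unfold pvRows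
        rw [PySem.List.enumerate_append, List.map_append]
        congr 1
        · apply List.map_congr_left
          intro q hq
          obtain ⟨j, hj, rfl⟩ := (PySem.List.mem_enumerate_iff (pvU kc l) 0 q).mp hq
          simp only [zero_add, List.filter_append]
          have : (pvG kc x == (pvU kc l)[j]) = false := by
            simp only [beq_eq_false_iff_ne, ne_eq]
            intro he
            exact hmem (he ▸ List.getElem_mem hj)
          simp [this]
        · rw [PySem.List.enumerate_cons, PySem.List.enumerate_nil]
          simp only [List.map_cons, List.map_nil, zero_add, List.filter_append]
          have hfl : l.filter (fun p => pvG kc p == pvG kc x) = [] := by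
            rw [List.filter_eq_nil_iff]
            intro p hp
            simp only [beq_eq_false_iff_ne, ne_eq, Bool.not_eq_true, beq_eq_false_iff_ne]
            intro he
            exact hmem (he ▸ pvMemU kc l p hp)
          simp [hfl]

theorem pvBeq (t : List (String × List String)) (kc : List String) :
    get_skill_groups_info_alt t kc = (pvU kc t, pvRows kc t (pvU kc t)) := by
  obtain ⟨hh1, -, hh3⟩ := pvBinv kc t
  have : get_skill_groups_info_alt t kc = ((pvFoldB kc t).1, (pvFoldB kc t).2.2.items) := rfl
  rw [this, hh1, hh3]

-- ===== VERDICT (by name: the statement is the Claim_ definition above) =====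
theorem get_skill_groups_info_spec : Claim_equal_get_skill_groups_info := by
  intro t kc _ _
  unfold Spec_get_skill_groups_info
  rw [pvAeq, pvBeq]
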